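-- pv_equiv track=rewrite | github.com/Adri01023/2DAM | Python/Unidad 1/Examen_Adrian_MartinEVA1/Ejercicio1.py | cifradoPin
-- ===== SOURCE A (Python) =====
-- def cifradoPin(codigo):
--     numeros = str(codigo)
--     lista = []
--     cifrado = []
--     for i in range(0, 4):
--         cifrado.clear()
--         for x in range (1,11):
--             if int(numeros[i]) == x:
--                 cifrado.append("0")
--             else:
--                 cifrado.append("X")
--         if int(numeros[i]) == 0:
--             cifrado[-1] = "0"
--         lista.append(str(cifrado).replace("[","").replace("]","").replace("'",""))
--     tupla = tuple(lista)
--     return tupla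
-- ===== SOURCE B (Python) =====
-- def cifradoPin(codigo):
--     numeros = str(codigo)
--     lista = []
--     for i in range(4):
--         p = (int(numeros[i]) - 1) % 10
--         lista.append("X, " * p + "0" + ", X" * (9 - p))
--     return tuple(lista)
-- ===== Notes on version B (the rewrite author's own statement) =====
-- stated objective: simpler
-- what changed: B computes each row as a closed-form string expression 'X, '*p + '0' + ', X'*(9-p) with p = (int(numeros[i])-1) % 10 (the modulo wraps digit 0 to the last slot), replacing A's 10-slot list built by a 1..10 scan-and-compare loop, its cifrado[-1] patch for digit 0 and its str(list).replace('[','')... string surgery.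
import Mathlib
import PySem

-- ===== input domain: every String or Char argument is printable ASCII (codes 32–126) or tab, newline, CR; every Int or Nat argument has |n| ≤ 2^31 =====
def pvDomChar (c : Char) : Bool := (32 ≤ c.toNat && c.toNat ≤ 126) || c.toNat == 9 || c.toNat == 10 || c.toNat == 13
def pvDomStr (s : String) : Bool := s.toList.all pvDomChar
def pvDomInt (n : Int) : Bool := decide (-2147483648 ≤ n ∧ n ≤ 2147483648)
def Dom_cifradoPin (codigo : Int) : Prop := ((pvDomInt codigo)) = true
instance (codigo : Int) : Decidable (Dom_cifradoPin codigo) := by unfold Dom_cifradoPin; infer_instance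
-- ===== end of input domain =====

-- B builds each row by pure string arithmetic: "X, "*p + "0" + ", X"*(9-p) with
-- p = (d-1)%10 (the modulo sends digit 0 to the last slot), so no per-slot list,
-- no 1..10 scan-and-compare and no str(list).replace surgery (objective: simpler).

-- ===== PORT A =====
-- str(cifrado) for a list of (quote-free) strings: "['X', 'X', …]"; hand-ported, exact
-- for lists of strings containing no quotes/backslashes (here only "X"/"0").
def pyReprStrList (xs : List String) : List Char :=
  '[' :: (PySem.Chars.join [',', ' '] (xs.map (fun s => '\'' :: (s.toList ++ ['\'']))) ++ [']'])

-- one iteration of A's outer loop; int(numeros[i]) is loop-invariant in the inner loop,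
-- so it is evaluated once here (Python raises at exactly the same point, on the inner
-- loop's first iteration); none = the raise propagating.
def cifradoPinStepA (numeros : List Char) (acc : Option (List String)) (i : Int) :
    Option (List String) :=
  match acc with
  | none => none
  | some lista =>
    match (PySem.List.pyGet? numeros i).bind (fun c => PySem.Int.ofChars? [c]) with
    | none => none
    | some d =>
      let cifrado := (PySem.List.pyRange 1 11 1).foldl
        (fun cif x => if d == x then cif ++ ["0"] else cif ++ ["X"]) []
      let cifrado := if d == 0 then PySem.List.pySetD cifrado (-1) "0" else cifrado
      some (lista ++ [String.ofList (PySem.Chars.replace (PySem.Chars.replace (PySem.Chars.replace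
        (pyReprStrList cifrado) ['['] []) [']'] []) ['\''] [])])

def cifradoPin (codigo : Int) : List String :=
  (((PySem.List.pyRange 0 4 1).foldl
    (cifradoPinStepA (PySem.Int.toChars codigo)) (some []))).getD []

-- ===== PORT B =====
-- one iteration of Source B's loop: the row as the closed string form
-- "X, "*p + "0" + ", X"*(9-p), p = (int(numeros[i])-1) % 10; string * and + ported on
-- code points, % is PySem.Int.mod (Python's sign rule); none = the raise propagating.
def cifradoPinStepB (numeros : List Char) (acc : Option (List String)) (i : Int) :
    Option (List String) :=
  match acc with
  | none => none
  | some lista =>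
    match (PySem.List.pyGet? numeros i).bind (fun c => PySem.Int.ofChars? [c]) with
    | none => none
    | some d =>
      let p := PySem.Int.mod (d - 1) 10
      some (lista ++ [String.ofList
        (PySem.List.pyRepeat ['X', ',', ' '] p ++ ['0'] ++ PySem.List.pyRepeat [',', ' ', 'X'] (9 - p))])

def cifradoPin_alt (codigo : Int) : List String :=
  (((PySem.List.pyRange 0 4 1).foldl
    (cifradoPinStepB (PySem.Int.toChars codigo)) (some []))).getD []

-- ===== PRECONDITION & SPEC =====
-- A raises outside this: ValueError on negative codigo (int('-')), IndexError on fewer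
-- than four digits; Pre_ admits exactly the inputs on which A returns.
def Pre_cifradoPin (codigo : Int) : Prop := 1000 ≤ codigo
instance (codigo : Int) : Decidable (Pre_cifradoPin codigo) := by unfold Pre_cifradoPin; infer_instance

def pvWitness_cifradoPin : Int := (1024)

def Spec_cifradoPin (codigo : Int) (out : List String) : Prop := out = cifradoPin_alt codigo
instance (codigo : Int) (out : List String) : Decidable (Spec_cifradoPin codigo out) := by unfold Spec_cifradoPin; infer_instance

-- ===== CLAIM (what is proved, stated in full; the proofs are below) =====
def Claim_equal_cifradoPin : Prop := ∀ (codigo : Int), Dom_cifradoPin codigo → Pre_cifradoPin codigo → Spec_cifradoPin codigo (cifradoPin codigo)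

-- ===== LEMMAS AND PROOFS =====

-- every char produced by Nat.toDigitsCore 10 is a digit char (or came from the seed list)
lemma mem_toDigitsCore10 (f : Nat) : ∀ (n : Nat) (l : List Char) (c : Char),
    c ∈ Nat.toDigitsCore 10 f n l → (∃ k, k < 10 ∧ c = Nat.digitChar k) ∨ c ∈ l := by
  induction f with
  | zero => intro n l c h; exact Or.inr h
  | succ f ih =>
    intro n l c h
    simp only [Nat.toDigitsCore] at h
    split at h
    next =>
      rcases List.mem_cons.mp h with h | h
      · exact Or.inl ⟨n % 10, Nat.mod_lt _ (by norm_num), h⟩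
      · exact Or.inr h
    next =>
      rcases ih _ _ _ h with h' | h'
      · exact Or.inl h'
      · rcases List.mem_cons.mp h' with h' | h'
        · exact Or.inl ⟨n % 10, Nat.mod_lt _ (by norm_num), h'⟩
        · exact Or.inr h'

lemma mem_toChars_digit (codigo : Int) (h : 0 ≤ codigo) (c : Char)
    (hc : c ∈ PySem.Int.toChars codigo) : ∃ k, k < 10 ∧ c = Nat.digitChar k := by
  unfold PySem.Int.toChars at hc
  rw [if_neg (by omega)] at hc
  rcases mem_toDigitsCore10 _ _ _ _ hc with h' | h'
  · exact h'
  · simp at h'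

-- A's scan-built row string and B's closed-form row string agree for every digit 0..9
lemma row_eq (k : Nat) (hk : k < 10) (lista : List String) :
    cifradoPinStepA [Nat.digitChar k] (some lista) 0
      = cifradoPinStepB [Nat.digitChar k] (some lista) 0 := by
  unfold cifradoPinStepA cifradoPinStepB
  interval_cases k <;> rfl

lemma step_eq (numeros : List Char)
    (hnum : ∀ c ∈ numeros, ∃ k, k < 10 ∧ c = Nat.digitChar k) :
    ∀ (acc : Option (List String)), ∀ i ∈ PySem.List.pyRange 0 4 1,
      cifradoPinStepA numeros acc i = cifradoPinStepB numeros acc i := by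
  intro acc i _
  match acc with
  | none => rfl
  | some lista =>
    cases hg : PySem.List.pyGet? numeros i with
    | none => simp [cifradoPinStepA, cifradoPinStepB, hg]
    | some c =>
      obtain ⟨k, hk, rfl⟩ := hnum c (PySem.List.mem_of_pyGet?_eq_some numeros hg)
      have hA := row_eq k hk lista
      unfold cifradoPinStepA cifradoPinStepB at hA ⊢
      simp only [hg, Option.bind_some]
      simpa [PySem.List.pyGet?_zero_cons] using hA

-- ===== VERDICT (by name: the statement is the Claim_ definition above) =====
theorem cifradoPin_spec : Claim_equal_cifradoPin := by
  intro codigo _ hpre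
  unfold Spec_cifradoPin cifradoPin cifradoPin_alt
  have hnum : ∀ c ∈ PySem.Int.toChars codigo, ∃ k, k < 10 ∧ c = Nat.digitChar k :=
    fun c hc => mem_toChars_digit codigo (by unfold Pre_cifradoPin at hpre; omega) c hc
  rw [PySem.List.foldl_congr_mem _ _ _ _ (step_eq (PySem.Int.toChars codigo) hnum)]
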